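-- pv_equiv track=rewrite | github.com/bsoist/codesignal-arcade-solutions | 0_intro/052_longest_word.py | solution
-- ===== SOURCE A (Python) =====
-- def solution(text):
--     words = ['']
--     for char in text:
--         if char.isalpha():
--             words[-1] += char
--         else:
--             if words[-1]:
--                 words.append('')
--     return sorted(zip(map(len, words), words))[-1][1]
-- ===== SOURCE B (Python) =====
-- def solution(text):
--     best = ''
--     cur = ''
--     for ch in text:
--         if ch.isalpha():
--             cur += ch
--             if len(cur) > len(best) or (len(cur) == len(best) and cur > best):
--                 best = cur
--         else:
--             cur = ''
--     return best
-- ===== Notes on version B (the rewrite author's own statement) =====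
-- stated objective: simpler
-- what changed: B is a single online pass that keeps the running best word (updating it by the (length, lexicographic) key as each letter arrives), never materialising a word list and never sorting, whereas A first builds the full list of words and then sorts (len, word) pairs to pick the last.
import Mathlib
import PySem

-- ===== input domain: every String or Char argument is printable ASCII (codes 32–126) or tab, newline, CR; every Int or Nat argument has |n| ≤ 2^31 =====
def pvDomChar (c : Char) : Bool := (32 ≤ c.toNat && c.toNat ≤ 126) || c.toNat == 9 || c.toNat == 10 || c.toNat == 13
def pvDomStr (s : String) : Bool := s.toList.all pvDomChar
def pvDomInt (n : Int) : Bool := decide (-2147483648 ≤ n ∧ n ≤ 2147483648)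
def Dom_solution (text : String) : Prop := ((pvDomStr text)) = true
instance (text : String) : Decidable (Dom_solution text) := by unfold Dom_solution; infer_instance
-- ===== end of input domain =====

-- B is a single online pass keeping the running best word (updated by the (length, word) key as
-- letters arrive), with no word list and no sort, replacing A's build-all-words-then-sort: simpler.

-- ===== PORT A =====
-- words[-1] is read with getLastD []: the accumulator list starts as [''] and never becomes
-- empty, so Python's words[-1] never raises and the default is unreachable; likewise the
-- final [-1] index is on a nonempty sorted list, so the `none` branch is unreachable.
def solution (text : String) : String :=
  let words : List (List Char) :=
    text.toList.foldl
      (fun words c =>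
        if PySem.Chars.isalpha c then
          words.dropLast ++ [words.getLastD [] ++ [c]]
        else
          if words.getLastD [] ≠ [] then words ++ [[]] else words)
      [[]]
  let pairs : List (Int × List Char) :=
    List.zip (words.map fun w => ((PySem.Chars.len w : Int))) words
  match PySem.List.pyGet? (PySem.List.sorted2 pairs (fun p => p.1) (fun p => p.2)) (-1) with
  | some p => String.ofList p.2
  | none => ""

-- ===== PORT B =====
-- state = (best, cur); on a letter extend cur and promote it when (len, lex) beats best;
-- on a non-letter reset cur. Python's `len(cur) > len(best) or (len(cur)==len(best) and cur > best)`.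
def solution_alt (text : String) : String :=
  let p := text.toList.foldl
    (fun (p : List Char × List Char) ch =>
      if PySem.Chars.isalpha ch then
        let cur := p.2 ++ [ch]
        if (PySem.Chars.len p.1 : Int) < (PySem.Chars.len cur : Int) ∨
           ((PySem.Chars.len cur : Int) = (PySem.Chars.len p.1 : Int) ∧ p.1 < cur) then
          (cur, cur)
        else (p.1, cur)
      else (p.1, ([] : List Char)))
    ([], [])
  String.ofList p.1

-- ===== PRECONDITION & SPEC =====
def Spec_solution (text : String) (out : String) : Prop := out = solution_alt text
instance (text : String) (out : String) : Decidable (Spec_solution text out) := by unfold Spec_solution; infer_instance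

-- ===== CLAIM (what is proved, stated in full; the proofs are below) =====
def Claim_equal_solution : Prop := ∀ (text : String), Dom_solution text → Spec_solution text (solution text)

-- ===== LEMMAS AND PROOFS =====

-- the lexicographic (len w, w) key both programs maximise
def pvKey (w : List Char) : Lex (Int × List Char) := toLex (((PySem.Chars.len w : Int)), w)

-- A's selection step, abstracted over the word list
def pvSelA (L : List (List Char)) : String :=
  match PySem.List.pyGet?
      (PySem.List.sorted2 (List.zip (L.map fun w => ((PySem.Chars.len w : Int))) L)
        (fun p => p.1) (fun p => p.2)) (-1) with
  | some p => String.ofList p.2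
  | none => ""

-- the word list A's loop produces from pending word `cur` and remaining text `t`
def pvExt : List Char → List Char → List (List Char)
  | cur, [] => [cur]
  | cur, c :: t =>
    if PySem.Chars.isalpha c then pvExt (cur ++ [c]) t
    else if cur ≠ [] then cur :: pvExt [] t else pvExt [] t

-- the maximal alphabetic runs of the text (proof-side tokenizer)
def altGroups (p : Char → Bool) : List Char → List (List Char)
  | [] => []
  | c :: rest =>
    if p c then (c :: rest.takeWhile p) :: altGroups p (rest.dropWhile p)
    else altGroups p rest
termination_by l => l.length
decreasing_by
  · have := List.length_dropWhile_le p rest; simp; omega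
  · simp

-- B's loop body, named for the proofs (definitionally the lambda in solution_alt)
def pvStep (p : List Char × List Char) (ch : Char) : List Char × List Char :=
  if PySem.Chars.isalpha ch then
    let cur := p.2 ++ [ch]
    if (PySem.Chars.len p.1 : Int) < (PySem.Chars.len cur : Int) ∨
       ((PySem.Chars.len cur : Int) = (PySem.Chars.len p.1 : Int) ∧ p.1 < cur) then
      (cur, cur)
    else (p.1, cur)
  else (p.1, ([] : List Char))

-- running maximum over a word list (what B's pass computes, shown below)
def pvMfold : List (List Char) → List Char → List Char
  | [], b => b
  | w :: ws, b => pvMfold ws (if pvKey b < pvKey w then w else b)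

theorem pvZip_eq (L : List (List Char)) :
    List.zip (L.map fun w => ((PySem.Chars.len w : Int))) L
      = L.map (fun w => (((PySem.Chars.len w : Int)), w)) := by
  induction L with
  | nil => rfl
  | cons a t ih => simp only [List.map_cons, List.zip_cons_cons, ih]

-- Python's tuple comparison is < on the Lex product (pair form)
theorem pvCmp_eq (a b : Int × List Char) :
    (decide (a.1 < b.1) || (!decide (b.1 < a.1) && decide (a.2 < b.2)))
      = decide (toLex (a.1, a.2) < toLex (b.1, b.2)) := by
  rcases lt_trichotomy a.1 b.1 with h | h | h
  · simp [h, asymm h, Prod.Lex.lt_iff]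
  · simp [h, Prod.Lex.lt_iff]
  · simp [h, asymm h, h.ne', Prod.Lex.lt_iff]

theorem pvSorted2_eq (xs : List (Int × List Char)) :
    PySem.List.sorted2 xs (fun p => p.1) (fun p => p.2)
      = PySem.List.sorted xs (fun x => toLex (x.1, x.2)) false := by
  rw [PySem.List.sorted_eq_foldl_insertBy]
  unfold PySem.List.sorted2
  simp only [Bool.false_eq_true, if_false]
  have hb : (fun (a b : Int × List Char) =>
        decide (a.1 < b.1) || (!decide (b.1 < a.1) && decide (a.2 < b.2)))
      = (fun a b => decide ((fun x : Int × List Char => toLex (x.1, x.2)) a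
          < (fun x : Int × List Char => toLex (x.1, x.2)) b)) := by
    funext a b
    exact pvCmp_eq a b
  rw [hb]

theorem pvGetLast?_max {α κ : Type} [LinearOrder κ] (key : α → κ) :
    ∀ (l : List α), l.Pairwise (fun a b => key a ≤ key b) →
      ∀ p, l.getLast? = some p → p ∈ l ∧ ∀ y ∈ l, key y ≤ key p := by
  intro l
  induction l with
  | nil => intro _ p hp; simp at hp
  | cons a t ih =>
      intro hp p hlast
      rcases List.pairwise_cons.1 hp with ⟨ha, ht⟩
      cases t with
      | nil =>
          simp at hlast
          subst hlast
          exact ⟨List.mem_singleton_self a, by simp⟩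
      | cons b t' =>
          rw [List.getLast?_cons_cons] at hlast
          obtain ⟨hpm, hpmax⟩ := ih ht p hlast
          refine ⟨List.mem_cons_of_mem a hpm, ?_⟩
          intro y hy
          rcases List.mem_cons.1 hy with rfl | hy'
          · exact ha p hpm
          · exact hpmax y hy'

theorem pvSelA_spec (L : List (List Char)) (h : L ≠ []) :
    ∃ w ∈ L, (∀ y ∈ L, pvKey y ≤ pvKey w) ∧ pvSelA L = String.ofList w := by
  unfold pvSelA
  rw [pvZip_eq, pvSorted2_eq, PySem.List.pyGet?_neg_one]
  have hperm := PySem.List.sorted_perm (L.map fun w => (((PySem.Chars.len w : Int)), w))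
    (fun x : Int × List Char => toLex (x.1, x.2)) false
  have hsne : PySem.List.sorted (L.map fun w => (((PySem.Chars.len w : Int)), w))
      (fun x : Int × List Char => toLex (x.1, x.2)) false ≠ [] := by
    intro hnil
    have hlen := hperm.length_eq
    rw [hnil] at hlen
    simp at hlen
    exact h (List.eq_nil_of_length_eq_zero hlen.symm)
  obtain ⟨p, hp⟩ := Option.isSome_iff_exists.1 (List.getLast?_isSome.2 hsne)
  obtain ⟨hpm, hpmax⟩ := pvGetLast?_max (fun x : Int × List Char => toLex (x.1, x.2)) _
    (PySem.List.sorted_pairwise _ _) p hp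
  have hpm' : p ∈ L.map (fun w => (((PySem.Chars.len w : Int)), w)) := hperm.mem_iff.1 hpm
  obtain ⟨w, hwL, hwp⟩ := List.mem_map.1 hpm'
  refine ⟨w, hwL, ?_, ?_⟩
  · intro y hy
    have hym := hperm.mem_iff.2 (List.mem_map_of_mem (f := fun w => (((PySem.Chars.len w : Int)), w)) hy)
    have hle := hpmax _ hym
    rw [← hwp] at hle
    exact hle
  · rw [hp, ← hwp]

theorem pvKey_unique {L : List (List Char)} {w m : List Char}
    (hw : ∀ y ∈ L, pvKey y ≤ pvKey w) (hm : w ∈ L)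
    (hw' : ∀ y ∈ L, pvKey y ≤ pvKey m) (hm' : m ∈ L) : w = m := by
  have h3 : pvKey w = pvKey m := le_antisymm (hw' w hm) (hw m hm')
  unfold pvKey at h3
  have h4 : ((((PySem.Chars.len w : Int))), w) = ((((PySem.Chars.len m : Int))), m) :=
    toLex.injective h3
  exact congrArg Prod.snd h4

theorem pvFoldl_ext : ∀ (t : List Char) (front : List (List Char)) (cur : List Char),
    t.foldl
      (fun words c =>
        if PySem.Chars.isalpha c then
          words.dropLast ++ [words.getLastD [] ++ [c]]
        else
          if words.getLastD [] ≠ [] then words ++ [[]] else words)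
      (front ++ [cur]) = front ++ pvExt cur t := by
  intro t
  induction t with
  | nil => intro front cur; simp [pvExt]
  | cons c t ih =>
      intro front cur
      rw [List.foldl_cons]
      by_cases hc : PySem.Chars.isalpha c
      · have hstep : (if PySem.Chars.isalpha c then
            (front ++ [cur]).dropLast ++ [(front ++ [cur]).getLastD [] ++ [c]]
          else
            if (front ++ [cur]).getLastD [] ≠ [] then (front ++ [cur]) ++ [[]] else (front ++ [cur]))
            = front ++ [cur ++ [c]] := by
          simp [hc]
        rw [hstep, ih]
        simp [pvExt, hc]
      · by_cases hcur : cur = []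
        · have hstep : (if PySem.Chars.isalpha c then
              (front ++ [cur]).dropLast ++ [(front ++ [cur]).getLastD [] ++ [c]]
            else
              if (front ++ [cur]).getLastD [] ≠ [] then (front ++ [cur]) ++ [[]] else (front ++ [cur]))
              = front ++ [cur] := by
            simp [hc, hcur]
          rw [hstep, ih]
          simp [pvExt, hc, hcur]
        · have hstep : (if PySem.Chars.isalpha c then
              (front ++ [cur]).dropLast ++ [(front ++ [cur]).getLastD [] ++ [c]]
            else
              if (front ++ [cur]).getLastD [] ≠ [] then (front ++ [cur]) ++ [[]] else (front ++ [cur]))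
              = (front ++ [cur]) ++ [[]] := by
            simp [hc, hcur]
          rw [hstep, ih (front ++ [cur]) []]
          simp [pvExt, hc, hcur]

theorem pvExt_ne_nil : ∀ (cur t : List Char), pvExt cur t ≠ [] := by
  intro cur t
  induction t generalizing cur with
  | nil => simp [pvExt]
  | cons c t ih =>
      simp only [pvExt]
      split_ifs with h1 h2
      · exact ih (cur ++ [c])
      · simp
      · exact ih []

theorem pvAltGroups_ne_nil (p : Char → Bool) :
    ∀ (l : List Char), ∀ w ∈ altGroups p l, w ≠ [] := by
  have key : ∀ (n : Nat) (l : List Char), l.length ≤ n → ∀ w ∈ altGroups p l, w ≠ [] := by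
    intro n
    induction n with
    | zero =>
        intro l hl w hw
        have hnil : l = [] := List.eq_nil_of_length_eq_zero (Nat.le_zero.1 hl)
        subst hnil
        simp [altGroups] at hw
    | succ n ih =>
        intro l hl w hw
        cases l with
        | nil => simp [altGroups] at hw
        | cons c rest =>
            by_cases hc : p c
            · rw [show altGroups p (c :: rest)
                  = (c :: rest.takeWhile p) :: altGroups p (rest.dropWhile p) by
                  simp [altGroups, hc]] at hw
              rcases List.mem_cons.1 hw with rfl | hw'
              · simp
              · have hlen : (rest.dropWhile p).length ≤ n := by
                  have := List.length_dropWhile_le p rest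
                  simp at hl
                  omega
                exact ih (rest.dropWhile p) hlen w hw'
            · rw [show altGroups p (c :: rest) = altGroups p rest by
                  simp [altGroups, hc]] at hw
              have hlen : rest.length ≤ n := by simp at hl; omega
              exact ih rest hlen w hw
  exact fun l => key l.length l (le_refl _)

theorem pvExt_eq_groups : ∀ (t cur : List Char),
    (pvExt cur t = (if cur = [] then altGroups PySem.Chars.isalpha t
        else (cur ++ t.takeWhile PySem.Chars.isalpha)
              :: altGroups PySem.Chars.isalpha (t.dropWhile PySem.Chars.isalpha)))
    ∨ (pvExt cur t = (if cur = [] then altGroups PySem.Chars.isalpha t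
        else (cur ++ t.takeWhile PySem.Chars.isalpha)
              :: altGroups PySem.Chars.isalpha (t.dropWhile PySem.Chars.isalpha)) ++ [[]]) := by
  intro t
  induction t with
  | nil =>
      intro cur
      by_cases hcur : cur = [] <;> simp [pvExt, altGroups, hcur]
  | cons c t ih =>
      intro cur
      by_cases hc : PySem.Chars.isalpha c
      · have hrhs : (if cur = [] then altGroups PySem.Chars.isalpha (c :: t)
            else (cur ++ (c :: t).takeWhile PySem.Chars.isalpha)
                  :: altGroups PySem.Chars.isalpha ((c :: t).dropWhile PySem.Chars.isalpha))
            = ((cur ++ [c]) ++ t.takeWhile PySem.Chars.isalpha)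
                  :: altGroups PySem.Chars.isalpha (t.dropWhile PySem.Chars.isalpha) := by
          by_cases hcur : cur = [] <;>
            simp [hcur, altGroups, hc]
        rw [hrhs]
        have hext : pvExt cur (c :: t) = pvExt (cur ++ [c]) t := by simp [pvExt, hc]
        rw [hext]
        rcases ih (cur ++ [c]) with h | h <;>
          rw [if_neg (by simp : ¬(cur ++ [c] : List Char) = [])] at h
        · left; rw [h]
        · right; rw [h]
      · have haG : altGroups PySem.Chars.isalpha (c :: t) = altGroups PySem.Chars.isalpha t := by
          simp [altGroups, hc]
        by_cases hcur : cur = []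
        · subst hcur
          have hext : pvExt [] (c :: t) = pvExt [] t := by simp [pvExt, hc]
          rw [hext]
          rcases ih [] with h | h <;> rw [if_pos rfl] at h
          · left; rw [h]; simp [haG]
          · right; rw [h]; simp [haG]
        · have hext : pvExt cur (c :: t) = cur :: pvExt [] t := by simp [pvExt, hc, hcur]
          have hrhs : (if cur = [] then altGroups PySem.Chars.isalpha (c :: t)
              else (cur ++ (c :: t).takeWhile PySem.Chars.isalpha)
                    :: altGroups PySem.Chars.isalpha ((c :: t).dropWhile PySem.Chars.isalpha))
              = cur :: altGroups PySem.Chars.isalpha t := by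
            simp [hcur, hc, haG]
          rw [hext, hrhs]
          rcases ih [] with h | h <;> rw [if_pos rfl] at h
          · left; rw [h]
          · right; rw [h]; simp

-- ===== B-side lemmas =====

-- the port's branch condition is exactly `pvKey b < pvKey cur`
theorem pvCond_iff (b cur : List Char) :
    ((PySem.Chars.len b : Int) < (PySem.Chars.len cur : Int) ∨
      ((PySem.Chars.len cur : Int) = (PySem.Chars.len b : Int) ∧ b < cur))
      ↔ pvKey b < pvKey cur := by
  unfold pvKey
  rw [Prod.Lex.lt_iff]
  constructor
  · rintro (h | ⟨h1, h2⟩)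
    · exact Or.inl h
    · exact Or.inr ⟨h1.symm, h2⟩
  · rintro (h | ⟨h1, h2⟩)
    · exact Or.inl h
    · exact Or.inr ⟨h1.symm, h2⟩

-- a proper prefix has a strictly smaller key
theorem pvKey_prefix_lt (u v : List Char) (hv : v ≠ []) : pvKey u < pvKey (u ++ v) := by
  unfold pvKey
  rw [Prod.Lex.lt_iff]
  left
  simp [PySem.Chars.len_eq]
  exact List.length_pos_of_ne_nil hv

-- scanning an all-alphabetic run updates best exactly by the final word's key
theorem pvRun : ∀ (r : List Char), (∀ c ∈ r, PySem.Chars.isalpha c = true) → ∀ b cur,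
    List.foldl pvStep (b, cur) r
      = ((if r ≠ [] ∧ pvKey b < pvKey (cur ++ r) then cur ++ r else b), cur ++ r) := by
  intro r
  induction r with
  | nil => intro _ b cur; simp
  | cons c r' ih =>
      intro halpha b cur
      have hc : PySem.Chars.isalpha c = true := halpha c (List.mem_cons_self)
      rw [List.foldl_cons]
      have hstep : pvStep (b, cur) c
          = (if pvKey b < pvKey (cur ++ [c]) then (cur ++ [c], cur ++ [c]) else (b, cur ++ [c])) := by
        unfold pvStep
        rw [if_pos hc]
        by_cases h : pvKey b < pvKey (cur ++ [c])
        · rw [if_pos ((pvCond_iff b (cur ++ [c])).2 h), if_pos h]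
        · rw [if_neg (fun hx => h ((pvCond_iff b (cur ++ [c])).1 hx)), if_neg h]
      have halpha' : ∀ x ∈ r', PySem.Chars.isalpha x = true :=
        fun x hx => halpha x (List.mem_cons_of_mem c hx)
      have hW : (cur ++ [c]) ++ r' = cur ++ (c :: r') := by simp
      have hne : (c :: r') ≠ [] := by simp
      by_cases hr : r' = []
      · subst hr
        simp only [List.foldl_nil]
        rw [hstep]
        by_cases hlt : pvKey b < pvKey (cur ++ [c])
        · rw [if_pos hlt, if_pos (And.intro hne hlt)]
        · rw [if_neg hlt, if_neg (fun h => hlt h.2)]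
      · have hprefix : pvKey (cur ++ [c]) < pvKey (cur ++ (c :: r')) := by
          rw [← hW]
          exact pvKey_prefix_lt _ _ hr
        rw [hstep]
        by_cases hlt : pvKey b < pvKey (cur ++ [c])
        · rw [if_pos hlt, ih halpha' (cur ++ [c]) (cur ++ [c]), hW,
             if_pos (And.intro hr hprefix), if_pos (And.intro hne (lt_trans hlt hprefix))]
        · rw [if_neg hlt, ih halpha' b (cur ++ [c]), hW]
          by_cases hp : pvKey b < pvKey (cur ++ (c :: r'))
          · rw [if_pos (And.intro hr hp), if_pos (And.intro hne hp)]
          · rw [if_neg (fun h => hp h.2), if_neg (fun h => hp h.2)]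

-- heads of dropWhile fail the predicate
theorem pvDropWhile_head (p : Char → Bool) :
    ∀ (l : List Char) c d, l.dropWhile p = c :: d → p c = false := by
  intro l
  induction l with
  | nil => intro c d h; simp [List.dropWhile] at h
  | cons a t ih =>
      intro c d h
      by_cases ha : p a
      · rw [List.dropWhile_cons_of_pos ha] at h
        exact ih c d h
      · rw [List.dropWhile_cons_of_neg ha] at h
        cases h
        exact Bool.of_not_eq_true ha

-- B's whole pass computes a running maximum over the alphabetic runs
theorem pvG : ∀ (n : Nat) (t : List Char), t.length ≤ n → ∀ b,
    (List.foldl pvStep (b, []) t).1 = pvMfold (altGroups PySem.Chars.isalpha t) b := by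
  intro n
  induction n with
  | zero =>
      intro t ht b
      have : t = [] := List.eq_nil_of_length_eq_zero (Nat.le_zero.1 ht)
      subst this
      simp [pvMfold, altGroups]
  | succ n ih =>
      intro t ht b
      cases t with
      | nil => simp [pvMfold, altGroups]
      | cons c rest =>
          by_cases hc : PySem.Chars.isalpha c
          · -- run r = c :: takeWhile, remainder d = dropWhile
            have hsplit : (c :: rest) = (c :: rest.takeWhile PySem.Chars.isalpha)
                ++ rest.dropWhile PySem.Chars.isalpha := by
              simp [List.takeWhile_append_dropWhile]
            have halpha : ∀ x ∈ (c :: rest.takeWhile PySem.Chars.isalpha),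
                PySem.Chars.isalpha x = true := by
              intro x hx
              rcases List.mem_cons.1 hx with rfl | hx'
              · exact hc
              · exact List.mem_takeWhile_imp hx'
            have hG : altGroups PySem.Chars.isalpha (c :: rest)
                = (c :: rest.takeWhile PySem.Chars.isalpha)
                    :: altGroups PySem.Chars.isalpha (rest.dropWhile PySem.Chars.isalpha) := by
              simp [altGroups, hc]
            rw [show List.foldl pvStep (b, ([] : List Char)) (c :: rest)
                = List.foldl pvStep
                   (List.foldl pvStep (b, [])
                     (c :: rest.takeWhile PySem.Chars.isalpha))
                   (rest.dropWhile PySem.Chars.isalpha) by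
                rw [← List.foldl_append, ← hsplit]]
            rw [pvRun _ halpha b []]
            have hrun : (if (c :: rest.takeWhile PySem.Chars.isalpha) ≠ [] ∧
                  pvKey b < pvKey ([] ++ (c :: rest.takeWhile PySem.Chars.isalpha))
                then [] ++ (c :: rest.takeWhile PySem.Chars.isalpha) else b)
                = (if pvKey b < pvKey (c :: rest.takeWhile PySem.Chars.isalpha)
                    then (c :: rest.takeWhile PySem.Chars.isalpha) else b) := by
              simp
            rw [hG]
            simp only [List.nil_append]
            set b1 := (if pvKey b < pvKey (c :: rest.takeWhile PySem.Chars.isalpha)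
                then (c :: rest.takeWhile PySem.Chars.isalpha) else b) with hb1
            rw [show (if (c :: rest.takeWhile PySem.Chars.isalpha) ≠ [] ∧
                  pvKey b < pvKey (c :: rest.takeWhile PySem.Chars.isalpha)
                then (c :: rest.takeWhile PySem.Chars.isalpha) else b) = b1 by
              rw [hb1]; simp]
            rw [show pvMfold ((c :: rest.takeWhile PySem.Chars.isalpha)
                  :: altGroups PySem.Chars.isalpha (rest.dropWhile PySem.Chars.isalpha)) b
                = pvMfold (altGroups PySem.Chars.isalpha (rest.dropWhile PySem.Chars.isalpha)) b1 from rfl]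
            cases hd : rest.dropWhile PySem.Chars.isalpha with
            | nil => simp [pvMfold, altGroups]
            | cons c' d' =>
                have hc' : PySem.Chars.isalpha c' = false := pvDropWhile_head _ rest c' d' hd
                have hstep : pvStep (b1, c :: rest.takeWhile PySem.Chars.isalpha) c' = (b1, []) := by
                  unfold pvStep
                  rw [if_neg (by simp [hc'])]
                rw [List.foldl_cons, hstep]
                have hlen : d'.length ≤ n := by
                  have h1 := List.length_dropWhile_le PySem.Chars.isalpha rest
                  rw [hd] at h1
                  simp at h1 ht
                  omega
                rw [ih d' hlen b1]
                have : altGroups PySem.Chars.isalpha (c' :: d') = altGroups PySem.Chars.isalpha d' := by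
                  simp [altGroups, hc']
                rw [this]
          · have hstep : pvStep (b, []) c = (b, []) := by
              unfold pvStep
              rw [if_neg (by simp [hc])]
            rw [List.foldl_cons, hstep, ih rest (by simp at ht; omega) b]
            simp [altGroups, hc]

theorem pvMfold_mem : ∀ (ws : List (List Char)) (b : List Char),
    pvMfold ws b = b ∨ pvMfold ws b ∈ ws := by
  intro ws
  induction ws with
  | nil => intro b; left; rfl
  | cons w ws ih =>
      intro b
      by_cases h : pvKey b < pvKey w
      · rcases ih w with h1 | h1 <;> simp [pvMfold, h]
        · right; left; exact h1
        · right; right; exact h1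
      · rcases ih b with h1 | h1 <;> simp [pvMfold, h]
        · left; exact h1
        · right; right; exact h1

theorem pvMfold_max : ∀ (ws : List (List Char)) (b : List Char),
    (∀ y ∈ ws, pvKey y ≤ pvKey (pvMfold ws b)) ∧ pvKey b ≤ pvKey (pvMfold ws b) := by
  intro ws
  induction ws with
  | nil => intro b; exact ⟨by simp, le_refl _⟩
  | cons w ws ih =>
      intro b
      by_cases h : pvKey b < pvKey w
      · obtain ⟨h1, h2⟩ := ih w
        refine ⟨?_, ?_⟩
        · intro y hy
          rcases List.mem_cons.1 hy with rfl | hy'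
          · simpa [pvMfold, h] using h2
          · simpa [pvMfold, h] using h1 y hy'
        · simp only [pvMfold, if_pos h]
          exact le_of_lt (lt_of_lt_of_le h h2)
      · obtain ⟨h1, h2⟩ := ih b
        refine ⟨?_, ?_⟩
        · intro y hy
          rcases List.mem_cons.1 hy with rfl | hy'
          · simp only [pvMfold, if_neg h]
            exact le_trans (le_of_not_gt (by simpa using h)) h2
          · simpa [pvMfold, h] using h1 y hy'
        · simpa [pvMfold, h] using h2

-- ===== VERDICT (by name: the statement is the Claim_ definition above) =====
theorem solution_spec : Claim_equal_solution := by
  unfold Claim_equal_solution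
  intro text _
  unfold Spec_solution
  have hA : solution text = pvSelA (List.foldl
      (fun words c =>
        if PySem.Chars.isalpha c then
          words.dropLast ++ [words.getLastD [] ++ [c]]
        else
          if words.getLastD [] ≠ [] then words ++ [[]] else words)
      [[]] text.toList) := rfl
  have hfold := pvFoldl_ext text.toList [] []
  simp only [List.nil_append] at hfold
  rw [hfold] at hA
  have hB : solution_alt text
      = String.ofList ((List.foldl pvStep ([], []) text.toList).1) := rfl
  rw [pvG text.toList.length text.toList (le_refl _) []] at hB
  set G := altGroups PySem.Chars.isalpha text.toList with hGdef
  by_cases hG : G = []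
  · -- no words: B returns ''; A's word list is [[]] or [[],[]]-shaped via pvExt cases
    rcases pvExt_eq_groups text.toList [] with h | h <;> rw [if_pos rfl, ← hGdef, hG] at h
    · exact absurd h (pvExt_ne_nil [] text.toList)
    · rw [hA, h, hB, hG]
      simp only [List.nil_append]
      decide
  · -- some words: both return the unique key-maximal word of G
    have hBmem : pvMfold G [] ∈ G := by
      rcases pvMfold_mem G [] with h | h
      · exfalso
        obtain ⟨g, hg⟩ := List.exists_mem_of_ne_nil _ hG
        have hgmax := (pvMfold_max G []).1 g hg
        rw [h] at hgmax
        have hgne : g ≠ [] := pvAltGroups_ne_nil PySem.Chars.isalpha text.toList g (hGdef ▸ hg)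
        have : pvKey [] < pvKey g := by
          have := pvKey_prefix_lt [] g hgne
          simpa using this
        exact absurd hgmax (not_le_of_gt this)
      · exact h
    have hBmax : ∀ y ∈ G, pvKey y ≤ pvKey (pvMfold G []) := (pvMfold_max G []).1
    rcases pvExt_eq_groups text.toList [] with h | h <;> rw [if_pos rfl, ← hGdef] at h
    · obtain ⟨w, hwmem, hwmax, hwA⟩ := pvSelA_spec G hG
      rw [hA, h, hwA, hB]
      exact congrArg String.ofList (pvKey_unique hwmax hwmem hBmax hBmem)
    · obtain ⟨w, hwmem, hwmax, hwA⟩ := pvSelA_spec (G ++ [[]]) (by simp)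
      have hwG : w ∈ G := by
        rcases List.mem_append.1 hwmem with h1 | h2
        · exact h1
        · exfalso
          have hwnil : w = [] := List.mem_singleton.1 h2
          obtain ⟨g, hg⟩ := List.exists_mem_of_ne_nil _ hG
          have hgne : g ≠ [] := pvAltGroups_ne_nil PySem.Chars.isalpha text.toList g (hGdef ▸ hg)
          have hle := hwmax g (List.mem_append_left _ hg)
          rw [hwnil] at hle
          have : pvKey [] < pvKey g := by
            have := pvKey_prefix_lt [] g hgne
            simpa using this
          exact absurd hle (not_le_of_gt this)
      have hwmaxG : ∀ y ∈ G, pvKey y ≤ pvKey w :=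
        fun y hy => hwmax y (List.mem_append_left _ hy)
      rw [hA, h, hwA, hB]
      exact congrArg String.ofList (pvKey_unique hwmaxG hwG hBmax hBmem)
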